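-- pv_equiv track=rewrite | github.com/blackwut/WireFlow | scripts/hls_reports.py | get_resource_sum
-- ===== SOURCE A (Python) =====
-- def get_resource_sum(resources):
--
--     lut = 0
--     reg = 0
--     bram = 0
--     uram = 0
--     dsps = 0
--     for r in resources:
--         lut += r[1]
--         reg += r[2]
--         bram += r[3]
--         uram += r[4]
--         dsps += r[5]
--     return (lut, reg, bram, uram, dsps)
-- ===== SOURCE B (Python) =====
-- def get_resource_sum(resources):
--     return (sum(r[1] for r in resources),
--             sum(r[2] for r in resources),
--             sum(r[3] for r in resources),
--             sum(r[4] for r in resources),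
--             sum(r[5] for r in resources))
-- ===== Notes on version B (the rewrite author's own statement) =====
-- stated objective: simpler
-- what changed: Replaces the single fused accumulation loop with five independent column scans, one generator-sum per resource column.
import Mathlib
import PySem

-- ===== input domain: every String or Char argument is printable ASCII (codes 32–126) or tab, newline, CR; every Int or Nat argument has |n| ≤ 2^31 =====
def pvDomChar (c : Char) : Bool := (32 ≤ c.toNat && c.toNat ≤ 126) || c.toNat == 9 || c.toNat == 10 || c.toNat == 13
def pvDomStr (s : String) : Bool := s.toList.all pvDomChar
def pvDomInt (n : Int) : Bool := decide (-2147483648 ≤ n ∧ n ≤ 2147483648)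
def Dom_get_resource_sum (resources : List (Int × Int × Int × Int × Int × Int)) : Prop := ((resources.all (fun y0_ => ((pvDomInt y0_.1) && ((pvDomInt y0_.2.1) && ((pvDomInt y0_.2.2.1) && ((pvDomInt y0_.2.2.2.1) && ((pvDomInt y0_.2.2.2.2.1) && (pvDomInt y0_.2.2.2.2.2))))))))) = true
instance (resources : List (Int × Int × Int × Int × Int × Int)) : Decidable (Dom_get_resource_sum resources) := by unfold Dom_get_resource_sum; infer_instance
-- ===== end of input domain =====

-- ===== PORT A =====
-- Port of A: one fused fold accumulating the five totals together.
def get_resource_sum (resources : List (Int × Int × Int × Int × Int × Int)) : Int × Int × Int × Int × Int :=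
  resources.foldl
    (fun (acc : Int × Int × Int × Int × Int) r =>
      (acc.1 + r.2.1, acc.2.1 + r.2.2.1, acc.2.2.1 + r.2.2.2.1,
       acc.2.2.2.1 + r.2.2.2.2.1, acc.2.2.2.2 + r.2.2.2.2.2))
    (0, 0, 0, 0, 0)

-- ===== PORT B =====
-- Port of B: five independent column sums (one pass per column); objective: simpler.
def get_resource_sum_alt (resources : List (Int × Int × Int × Int × Int × Int)) : Int × Int × Int × Int × Int :=
  ((resources.map (fun r => r.2.1)).sum,
   (resources.map (fun r => r.2.2.1)).sum,
   (resources.map (fun r => r.2.2.2.1)).sum,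
   (resources.map (fun r => r.2.2.2.2.1)).sum,
   (resources.map (fun r => r.2.2.2.2.2)).sum)

-- ===== PRECONDITION & SPEC =====
def Spec_get_resource_sum (resources : List (Int × Int × Int × Int × Int × Int)) (out : Int × Int × Int × Int × Int) : Prop := out = get_resource_sum_alt resources
instance (resources : List (Int × Int × Int × Int × Int × Int)) (out : Int × Int × Int × Int × Int) : Decidable (Spec_get_resource_sum resources out) := by unfold Spec_get_resource_sum; infer_instance

-- ===== CLAIM (what is proved, stated in full; the proofs are below) =====
def Claim_equal_get_resource_sum : Prop := ∀ (resources : List (Int × Int × Int × Int × Int × Int)), Dom_get_resource_sum resources → Spec_get_resource_sum resources (get_resource_sum resources)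

-- ===== LEMMAS AND PROOFS =====

-- ===== VERDICT (by name: the statement is the Claim_ definition above) =====
lemma fold_cols (resources : List (Int × Int × Int × Int × Int × Int))
    (a b c d e : Int) :
    resources.foldl
      (fun (acc : Int × Int × Int × Int × Int) r =>
        (acc.1 + r.2.1, acc.2.1 + r.2.2.1, acc.2.2.1 + r.2.2.2.1,
         acc.2.2.2.1 + r.2.2.2.2.1, acc.2.2.2.2 + r.2.2.2.2.2))
      (a, b, c, d, e) =
    (a + (resources.map (fun r => r.2.1)).sum,
     b + (resources.map (fun r => r.2.2.1)).sum,
     c + (resources.map (fun r => r.2.2.2.1)).sum,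
     d + (resources.map (fun r => r.2.2.2.2.1)).sum,
     e + (resources.map (fun r => r.2.2.2.2.2)).sum) := by
  induction resources generalizing a b c d e with
  | nil => simp
  | cons h t ih =>
    simp only [List.foldl_cons, List.map_cons, List.sum_cons, ih, Prod.mk.injEq]
    refine ⟨by ring, by ring, by ring, by ring, by ring⟩

theorem get_resource_sum_spec : Claim_equal_get_resource_sum := by
  intro resources _
  unfold Spec_get_resource_sum get_resource_sum get_resource_sum_alt
  rw [fold_cols]
  simp
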